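-- pv_equiv track=rewrite | github.com/BrettRey/erdos-problem-993 | analyze_support_vertex.py | max_is_avoiding
-- ===== SOURCE A (Python) =====
-- def max_is_avoiding(n, adj, forbidden):
--     """Find the maximum size of an IS that avoids all vertices in `forbidden`."""
--     nbr = [set(adj[v]) for v in range(n)]
--     allowed = set(range(n)) - forbidden
--     best = [0]
--
--     def backtrack(v_list, idx, current, forbidden_set):
--         if idx == len(v_list):
--             # Check maximality among all vertices (not just allowed)
--             s = frozenset(current)
--             can_extend = any(u not in s and not (nbr[u] & s) for u in range(n))
--             if not can_extend:
--                 best[0] = max(best[0], len(current))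
--             return
--         v = v_list[idx]
--         # Skip
--         backtrack(v_list, idx + 1, current, forbidden_set)
--         # Include
--         if v not in forbidden_set:
--             backtrack(v_list, idx + 1, current + [v],
--                       forbidden_set | nbr[v])
--
--     backtrack(sorted(allowed), 0, [], set())
--     return best[0]
-- ===== SOURCE B (Python) =====
-- def max_is_avoiding(n, adj, forbidden):
--     """Find the maximum size of an IS that avoids all vertices in `forbidden`.
--
--     Iterative frontier version: instead of recursive backtracking, the list of
--     partial states (chosen vertices, blocked set) is materialised level by level
--     with one comprehension per vertex, then a single final pass keeps the
--     maximal ones and takes the best size.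
--     """
--     nbr = [set(adj[v]) for v in range(n)]
--     states = [((), frozenset())]
--     for v in sorted(set(range(n)) - forbidden):
--         states = [t for s, bl in states
--                   for t in ([(s, bl)] if v in bl
--                             else [(s, bl), (s + (v,), bl | nbr[v])])]
--     best = 0
--     for s, _ in states:
--         ss = frozenset(s)
--         if all(u in ss or (nbr[u] & ss) for u in range(n)):
--             best = max(best, len(s))
--     return best
-- ===== Notes on version B (the rewrite author's own statement) =====
-- stated objective: alternative
-- what changed: A's recursive backtracking with a mutable best is replaced by an iterative breadth-first frontier: the list of partial (chosen, blocked) states is materialised level by level with one comprehension per allowed vertex, then a single final pass keeps the states that are maximal in the full graph and takes the best size.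
import Mathlib
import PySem

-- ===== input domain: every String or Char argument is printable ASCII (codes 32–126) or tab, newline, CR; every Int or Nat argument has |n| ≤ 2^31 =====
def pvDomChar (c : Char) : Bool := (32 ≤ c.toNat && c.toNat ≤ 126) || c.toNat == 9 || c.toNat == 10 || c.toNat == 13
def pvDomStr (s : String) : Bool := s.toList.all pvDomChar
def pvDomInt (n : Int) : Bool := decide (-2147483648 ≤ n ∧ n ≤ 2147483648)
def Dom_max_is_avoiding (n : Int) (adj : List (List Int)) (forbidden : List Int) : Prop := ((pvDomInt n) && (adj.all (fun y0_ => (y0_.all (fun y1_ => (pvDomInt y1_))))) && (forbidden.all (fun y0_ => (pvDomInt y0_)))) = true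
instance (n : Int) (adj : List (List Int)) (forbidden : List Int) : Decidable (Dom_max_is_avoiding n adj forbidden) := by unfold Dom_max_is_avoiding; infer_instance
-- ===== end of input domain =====

-- B replaces A's recursive backtracking by an iterative level-by-level frontier of partial
-- states plus one final maximality pass (alternative decomposition, same return value).

-- ===== PORT A =====
-- A's `backtrack(v_list, idx, current, forbidden_set)` with the mutable `best[0]` threaded
-- through; recursion on the remaining suffix of v_list replaces the idx counter.
def backA (n : Int) (nbr : List (PySem.Set Int)) :
    List Int → List Int → PySem.Set Int → Int → Int
  | [], current, _, best =>
      let s := PySem.Set.ofList current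
      let canExtend := (PySem.List.pyRange 0 n 1).any (fun u =>
        !(PySem.Set.contains s u) &&
          (PySem.Set.inter (PySem.List.pyGetD nbr u PySem.Set.empty) s).isEmpty)
      if canExtend then best else max best (current.length : Int)
  | v :: rest, current, fset, best =>
      let b1 := backA n nbr rest current fset best
      if PySem.Set.contains fset v then b1
      else backA n nbr rest (current ++ [v])
             (PySem.Set.union fset (PySem.List.pyGetD nbr v PySem.Set.empty)) b1

def max_is_avoiding (n : Int) (adj : List (List Int)) (forbidden : List Int) : Int :=
  -- adj[v]: pyGet? is none (IndexError) when len(adj) < n; Pre_ excludes that, `.getD []` is unreachable there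
  let nbr : List (PySem.Set Int) :=
    (PySem.List.pyRange 0 n 1).map (fun v => PySem.Set.ofList ((PySem.List.pyGet? adj v).getD []))
  let allowed := PySem.Set.diff (PySem.Set.ofList (PySem.List.pyRange 0 n 1)) forbidden
  backA n nbr (PySem.List.sorted allowed (fun x => x) false) [] PySem.Set.empty 0

-- ===== PORT B =====
-- one level of the frontier comprehension: each state is kept, and extended when v is not blocked
def stepB (nbr : List (PySem.Set Int)) (states : List (List Int × PySem.Set Int)) (v : Int) :
    List (List Int × PySem.Set Int) :=
  states.flatMap (fun st =>
    if PySem.Set.contains st.2 v then [st]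
    else [st, (st.1 ++ [v], PySem.Set.union st.2 (PySem.List.pyGetD nbr v PySem.Set.empty))])

def isMaximalB (n : Int) (nbr : List (PySem.Set Int)) (s : List Int) : Bool :=
  let ss := PySem.Set.ofList s
  (PySem.List.pyRange 0 n 1).all (fun u =>
    PySem.Set.contains ss u ||
      !(PySem.Set.inter (PySem.List.pyGetD nbr u PySem.Set.empty) ss).isEmpty)

def max_is_avoiding_alt (n : Int) (adj : List (List Int)) (forbidden : List Int) : Int :=
  let nbr : List (PySem.Set Int) :=
    (PySem.List.pyRange 0 n 1).map (fun v => PySem.Set.ofList ((PySem.List.pyGet? adj v).getD []))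
  let allowed := PySem.Set.diff (PySem.Set.ofList (PySem.List.pyRange 0 n 1)) forbidden
  let states := (PySem.List.sorted allowed (fun x => x) false).foldl (stepB nbr) [([], PySem.Set.empty)]
  states.foldl (fun best st => if isMaximalB n nbr st.1 then max best (st.1.length : Int) else best) 0

-- ===== PRECONDITION & SPEC =====
-- Pre_ excludes only the IndexError: A reads adj[v] for every v in range(n), so it raises iff n > len(adj).
def Pre_max_is_avoiding (n : Int) (adj : List (List Int)) (forbidden : List Int) : Prop :=
  n ≤ (adj.length : Int)
instance (n : Int) (adj : List (List Int)) (forbidden : List Int) : Decidable (Pre_max_is_avoiding n adj forbidden) := by unfold Pre_max_is_avoiding; infer_instance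

def pvWitness_max_is_avoiding : Int × List (List Int) × List Int := (3, [[1], [0], []], [0])

def Spec_max_is_avoiding (n : Int) (adj : List (List Int)) (forbidden : List Int) (out : Int) : Prop := out = max_is_avoiding_alt n adj forbidden
instance (n : Int) (adj : List (List Int)) (forbidden : List Int) (out : Int) : Decidable (Spec_max_is_avoiding n adj forbidden out) := by unfold Spec_max_is_avoiding; infer_instance

-- ===== CLAIM (what is proved, stated in full; the proofs are below) =====
def Claim_equal_max_is_avoiding : Prop := ∀ (n : Int) (adj : List (List Int)) (forbidden : List Int), Dom_max_is_avoiding n adj forbidden → Pre_max_is_avoiding n adj forbidden → Spec_max_is_avoiding n adj forbidden (max_is_avoiding n adj forbidden)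

-- ===== LEMMAS AND PROOFS =====

-- folding over a flatMap is the nested fold
theorem foldl_flatMap_eq {α β γ : Type} (l : List α) (f : α → List β) (g : γ → β → γ) (b : γ) :
    (l.flatMap f).foldl g b = l.foldl (fun b x => (f x).foldl g b) b := by
  induction l generalizing b with
  | nil => rfl
  | cons x t ih => simp [List.flatMap_cons, List.foldl_append, ih]

-- B's maximality test is the negation of A's can_extend test
theorem isMaximalB_eq_not_canExtend (n : Int) (nbr : List (PySem.Set Int)) (c : List Int) :
    isMaximalB n nbr c =
      !((PySem.List.pyRange 0 n 1).any (fun u =>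
        !(PySem.Set.contains (PySem.Set.ofList c) u) &&
          (PySem.Set.inter (PySem.List.pyGetD nbr u PySem.Set.empty) (PySem.Set.ofList c)).isEmpty)) := by
  simp [isMaximalB, List.all_eq_not_any_not]

-- main invariant: folding the leaf pass over the fully expanded frontier equals
-- threading A's backtracking through the states
theorem frontier_eq_backA (n : Int) (nbr : List (PySem.Set Int)) (l : List Int) :
    ∀ (states : List (List Int × PySem.Set Int)) (b : Int),
    (l.foldl (stepB nbr) states).foldl
        (fun best st => if isMaximalB n nbr st.1 then max best (st.1.length : Int) else best) b
      = states.foldl (fun b st => backA n nbr l st.1 st.2 b) b := by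
  induction l with
  | nil =>
      intro states b
      simp only [List.foldl_nil]
      apply PySem.List.foldl_congr_mem
      intro acc st _
      rw [isMaximalB_eq_not_canExtend]
      simp only [backA]
      rcases h : (PySem.List.pyRange 0 n 1).any (fun u =>
        !(PySem.Set.contains (PySem.Set.ofList st.1) u) &&
          (PySem.Set.inter (PySem.List.pyGetD nbr u PySem.Set.empty) (PySem.Set.ofList st.1)).isEmpty) <;> simp
  | cons v rest ih =>
      intro states b
      simp only [List.foldl_cons]
      rw [ih, stepB, foldl_flatMap_eq]
      apply PySem.List.foldl_congr_mem
      intro acc st _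
      by_cases h : v ∈ st.2 <;> simp [backA, h]

theorem max_is_avoiding_spec : Claim_equal_max_is_avoiding := by
  intro n adj forbidden _ _
  unfold Spec_max_is_avoiding max_is_avoiding max_is_avoiding_alt
  rw [frontier_eq_backA]
  rfl
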